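-- pv_equiv track=rewrite | github.com/blzzua/codewars | 6-kyu/almost_even.py | split_integer
-- ===== SOURCE A (Python) =====
-- def split_integer(num, parts):
--     res = [0] * parts
--     while num > 0:
--         part = num // parts
--         num -= part
--         parts -= 1
--         res[parts] = part
--     return res[::-1]
-- ===== SOURCE B (Python) =====
-- def split_integer(num, parts):
--     if num <= 0:
--         return [0] * parts
--     q, r = divmod(num, parts)
--     return [q] * (parts - r) + [q + 1] * r
-- ===== Notes on version B (the rewrite author's own statement) =====
-- stated objective: simpler
-- what changed: B computes the split in closed form with one divmod ([q]*(parts-r)+[q+1]*r) instead of A's subtract-and-fill loop that writes the list back-to-front and reverses it; building two constant runs avoids the per-element Python-level divide loop (constant-factor speedup).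
import Mathlib
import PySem

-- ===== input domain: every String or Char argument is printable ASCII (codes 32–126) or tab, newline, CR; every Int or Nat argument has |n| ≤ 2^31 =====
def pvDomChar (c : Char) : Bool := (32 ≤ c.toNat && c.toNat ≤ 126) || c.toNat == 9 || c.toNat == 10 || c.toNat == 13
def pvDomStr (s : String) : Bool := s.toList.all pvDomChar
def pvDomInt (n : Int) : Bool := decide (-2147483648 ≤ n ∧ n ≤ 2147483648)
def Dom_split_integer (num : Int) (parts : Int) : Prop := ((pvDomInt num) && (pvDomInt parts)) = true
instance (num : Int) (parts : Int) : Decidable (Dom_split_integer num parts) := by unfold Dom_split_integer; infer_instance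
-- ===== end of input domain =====

-- B replaces A's subtract-and-fill loop by the closed-form split [q]*(parts-r)+[q+1]*r (simpler, same cost).


-- ===== PORT A =====
-- the while loop; fuel = parts.toNat + 1 suffices: inside Pre_ the loop runs exactly parts
-- iterations (proved below). 'parts -= 1; res[parts] = part' becomes set at (parts-1).toNat
-- (the index is in range whenever Pre_ holds; out of Pre_ the Python raises).
def splitLoop : Nat → Int → Int → List Int → List Int
  | 0, _, _, res => res
  | fuel + 1, num, parts, res =>
    if num > 0 then
      let part := PySem.Int.floordiv num parts
      splitLoop fuel (num - part) (parts - 1) (res.set (parts - 1).toNat part)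
    else res

def split_integer (num : Int) (parts : Int) : List Int :=
  (splitLoop (parts.toNat + 1) num parts (List.replicate parts.toNat 0)).reverse

-- ===== PORT B =====
def split_integer_alt (num : Int) (parts : Int) : List Int :=
  if num ≤ 0 then List.replicate parts.toNat 0
  else
    let q := PySem.Int.floordiv num parts
    let r := PySem.Int.mod num parts
    List.replicate (parts - r).toNat q ++ List.replicate r.toNat (q + 1)

-- ===== PRECONDITION & SPEC =====
-- Pre_ excludes exactly the inputs where A raises: num > 0 with parts = 0 (ZeroDivisionError)
-- or parts < 0 (IndexError on res[parts] with res = []).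
def Pre_split_integer (num : Int) (parts : Int) : Prop := 0 < num → 0 < parts
instance (num : Int) (parts : Int) : Decidable (Pre_split_integer num parts) := by unfold Pre_split_integer; infer_instance
def pvWitness_split_integer : Int × Int := (7, 3)

def Spec_split_integer (num : Int) (parts : Int) (out : List Int) : Prop := out = split_integer_alt num parts
instance (num : Int) (parts : Int) (out : List Int) : Decidable (Spec_split_integer num parts out) := by unfold Spec_split_integer; infer_instance

-- ===== CLAIM (what is proved, stated in full; the proofs are below) =====
def Claim_equal_split_integer : Prop := ∀ (num : Int) (parts : Int), Dom_split_integer num parts → Pre_split_integer num parts → Spec_split_integer num parts (split_integer num parts)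

-- ===== LEMMAS AND PROOFS =====

theorem drop_set_self (i : Nat) (a : Int) (xs : List Int) (h : i < xs.length) : (xs.set i a).drop i = a :: xs.drop (i+1) := by
  induction i generalizing xs with
  | zero => cases xs with | nil => simp at h | cons b t => simp
  | succ n ih => cases xs with | nil => simp at h | cons b t => simpa using ih t (by simpa using h)

-- Loop invariant: for num > 0 the loop fills the first m+1 slots of res back-to-front
-- with the reversed closed-form split.
theorem splitLoop_main (m : Nat) : ∀ (num : Int) (res : List Int), 0 < num → m + 1 ≤ res.length →
    splitLoop (m + 2) num ((m : Int) + 1) res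
      = (List.replicate (PySem.Int.mod num ((m:Int)+1)).toNat (PySem.Int.floordiv num ((m:Int)+1) + 1)
          ++ List.replicate (((m:Int) + 1) - PySem.Int.mod num ((m:Int)+1)).toNat (PySem.Int.floordiv num ((m:Int)+1)))
        ++ res.drop (m+1) := by
  induction m with
  | zero =>
    intro num res hnum hlen
    have hd : PySem.Int.floordiv num 1 = num := by
      rw [PySem.Int.floordiv_eq_ediv_of_pos one_pos]; simp
    have hm : PySem.Int.mod num 1 = 0 := by
      rw [PySem.Int.mod_eq_emod_of_pos one_pos]; simp
    simp only [Nat.cast_zero, zero_add, splitLoop, if_pos hnum, hd, hm, sub_self,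
      lt_irrefl, Int.toNat_zero]
    rw [if_neg (fun h => h)]
    obtain - | ⟨a, t⟩ := res
    · simp at hlen
    · simp
  | succ m ih =>
    intro num res hnum hlen
    set b : Int := (m:Int) + 2 with hb
    have hbpos : (0:Int) < b := by omega
    set q0 := PySem.Int.floordiv num b with hq0
    set e := PySem.Int.mod num b with he
    have he0 : 0 ≤ e := PySem.Int.mod_nonneg num hbpos
    have he1 : e < b := PySem.Int.mod_lt num hbpos
    have heq : q0 * b + e = num := PySem.Int.floordiv_mul_add_mod num b
    have heq2 : q0 * ((m:Int)+2) + e = num := by rw [hb] at heq; exact heq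
    have heq' : num - q0 = q0 * ((m:Int)+1) + e := by linear_combination -heq2
    have hq0lt : q0 < num := by
      by_cases h : 0 ≤ q0
      · nlinarith [heq', he0]
      · omega
    have hnum' : 0 < num - q0 := by omega
    have hstep : splitLoop (m + 1 + 2) num (((m+1:Nat) : Int) + 1) res
        = splitLoop (m + 2) (num - q0) ((m:Int) + 1) (res.set (m+1) q0) := by
      have hcast : (((m+1:Nat) : Int) + 1) = b := by push_cast; omega
      rw [hcast]
      simp only [splitLoop, if_pos hnum, ← hq0]
      have : (b - 1).toNat = m + 1 := by omega
      have hb1 : b - 1 = (m:Int) + 1 := by omega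
      rw [this, hb1]
    have hlen' : m + 1 ≤ (res.set (m+1) q0).length := by simpa using by omega
    have hdrop : (res.set (m+1) q0).drop (m+1) = q0 :: res.drop (m+2) :=
      drop_set_self (m+1) q0 res (by omega)
    have hfmB : PySem.Int.mod num (((m+1:Nat):Int)+1) = e := by
      have : (((m+1:Nat):Int)+1) = b := by push_cast; omega
      rw [this, ← he]
    have hfdB : PySem.Int.floordiv num (((m+1:Nat):Int)+1) = q0 := by
      have : (((m+1:Nat):Int)+1) = b := by push_cast; omega
      rw [this, ← hq0]
    rw [hstep, ih (num - q0) (res.set (m+1) q0) hnum' hlen', hdrop, hfmB, hfdB]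
    by_cases hcase : e ≤ (m:Int)
    · have hq' : PySem.Int.floordiv (num - q0) ((m:Int)+1) = q0 := by
        rw [PySem.Int.floordiv_eq_iff_of_pos (by omega)]
        constructor <;> nlinarith
      have hm' : PySem.Int.mod (num - q0) ((m:Int)+1) = e := by
        have := PySem.Int.floordiv_mul_add_mod (num - q0) ((m:Int)+1)
        rw [hq'] at this; linarith [heq']
      rw [hq', hm']
      have htn : (((m+1:Nat):Int) + 1 - e).toNat = ((m:Int) + 1 - e).toNat + 1 := by
        push_cast; omega
      rw [htn, List.replicate_succ']
      simp [List.append_assoc]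
    · have hem : e = (m:Int) + 1 := by omega
      have hq' : PySem.Int.floordiv (num - q0) ((m:Int)+1) = q0 + 1 := by
        rw [PySem.Int.floordiv_eq_iff_of_pos (by omega)]
        constructor <;> nlinarith
      have hm' : PySem.Int.mod (num - q0) ((m:Int)+1) = 0 := by
        have := PySem.Int.floordiv_mul_add_mod (num - q0) ((m:Int)+1)
        rw [hq'] at this; nlinarith
      rw [hq', hm']
      have h1 : (((m+1:Nat):Int) + 1 - e).toNat = 1 := by push_cast; omega
      have h2 : e.toNat = m + 1 := by omega
      have h3 : ((m:Int) + 1 - 0).toNat = m + 1 := by omega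
      rw [h1, h2, h3]
      simp [List.replicate_succ]

theorem split_integer_spec : Claim_equal_split_integer := by
  intro num parts _ hpre
  unfold Pre_split_integer at hpre
  unfold Spec_split_integer split_integer split_integer_alt
  by_cases hn : num ≤ 0
  · rw [if_pos hn]
    have hstop : splitLoop (parts.toNat + 1) num parts (List.replicate parts.toNat 0)
        = List.replicate parts.toNat 0 := by
      simp [splitLoop, not_lt.mpr hn]
    rw [hstop, List.reverse_replicate]
  · rw [if_neg hn]
    have hnum : 0 < num := by omega
    have hp : 0 < parts := hpre hnum
    obtain ⟨m, hm⟩ : ∃ m : Nat, parts = (m:Int)+1 := ⟨(parts-1).toNat, by omega⟩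
    have htn : parts.toNat = m + 1 := by omega
    rw [htn, hm]
    rw [splitLoop_main m num (List.replicate (m+1) 0) hnum (by simp)]
    simp [List.reverse_append]
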